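-- pv_equiv track=rewrite | github.com/P-oong/REB_green-remodeling-project | 01_matching_energy_buildings/matching_rules.py | find_unique_matches
-- ===== SOURCE A (Python) =====
-- def find_unique_matches(possible_matches):
--     from collections import defaultdict
--     # BD -> EBD 매핑
--     bd_to_ebds = defaultdict(list)
--     for ebd_idx, bd_pk in possible_matches:
--         bd_to_ebds[bd_pk].append(ebd_idx)
--
--     # 각 BD에 대해 첫 번째 EBD만 선택
--     confirmed = []
--     for bd_pk, ebd_list in bd_to_ebds.items():
--         if ebd_list:
--             confirmed.append((ebd_list[0], bd_pk))
--
--     return confirmed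
-- ===== SOURCE B (Python) =====
-- def find_unique_matches(possible_matches):
--     seen = set()
--     confirmed = []
--     for ebd_idx, bd_pk in possible_matches:
--         if bd_pk not in seen:
--             seen.add(bd_pk)
--             confirmed.append((ebd_idx, bd_pk))
--     return confirmed
-- ===== Notes on version B (the rewrite author's own statement) =====
-- stated objective: simpler
-- what changed: Replaces the two-pass group-into-dict-of-lists then select-first structure with a single dedup pass that keeps a seen set of bd_pk values and emits each (ebd_idx, bd_pk) on first sight.
import Mathlib
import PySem

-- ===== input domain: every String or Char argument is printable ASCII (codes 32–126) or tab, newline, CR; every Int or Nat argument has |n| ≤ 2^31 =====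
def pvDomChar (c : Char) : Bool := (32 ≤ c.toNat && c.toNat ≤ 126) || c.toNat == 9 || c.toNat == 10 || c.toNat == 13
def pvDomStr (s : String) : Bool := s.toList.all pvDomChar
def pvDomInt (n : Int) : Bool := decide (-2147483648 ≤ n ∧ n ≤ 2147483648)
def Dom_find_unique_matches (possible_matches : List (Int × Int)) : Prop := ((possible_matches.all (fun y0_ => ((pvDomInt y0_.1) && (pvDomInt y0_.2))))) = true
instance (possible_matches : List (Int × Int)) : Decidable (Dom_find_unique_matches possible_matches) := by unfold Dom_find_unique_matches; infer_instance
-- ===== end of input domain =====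

-- B replaces A's two-pass group-then-select (dict of lists, then first element per key) by one dedup pass with a seen set; same output, same order.


-- ===== PORT A =====
-- defaultdict(list) append: bd_to_ebds[bd_pk].append(ebd_idx)
def pvGroupStep (d : PySem.Dict Int (List Int)) (p : Int × Int) : PySem.Dict Int (List Int) :=
  d.insert p.2 (d.getD p.2 [] ++ [p.1])

-- `if ebd_list: confirmed.append((ebd_list[0], bd_pk))`
def pvEmitStep (acc : List (Int × Int)) (p : Int × List Int) : List (Int × Int) :=
  if p.2.isEmpty then acc else acc ++ [(p.2.headI, p.1)]

def find_unique_matches (possible_matches : List (Int × Int)) : List (Int × Int) :=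
  let bd_to_ebds := possible_matches.foldl pvGroupStep PySem.Dict.empty
  bd_to_ebds.items.foldl pvEmitStep []

-- ===== PORT B =====
def pvSeenStep (st : PySem.Set Int × List (Int × Int)) (p : Int × Int) :
    PySem.Set Int × List (Int × Int) :=
  if PySem.Set.contains st.1 p.2 then st
  else (PySem.Set.add st.1 p.2, st.2 ++ [(p.1, p.2)])

def find_unique_matches_alt (possible_matches : List (Int × Int)) : List (Int × Int) :=
  (possible_matches.foldl pvSeenStep (PySem.Set.empty, [])).2

-- ===== PRECONDITION & SPEC =====
def Spec_find_unique_matches (possible_matches : List (Int × Int)) (out : List (Int × Int)) : Prop := out = find_unique_matches_alt possible_matches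
instance (possible_matches : List (Int × Int)) (out : List (Int × Int)) : Decidable (Spec_find_unique_matches possible_matches out) := by unfold Spec_find_unique_matches; infer_instance

-- ===== CLAIM (what is proved, stated in full; the proofs are below) =====
def Claim_equal_find_unique_matches : Prop := ∀ (possible_matches : List (Int × Int)), Dom_find_unique_matches possible_matches → Spec_find_unique_matches possible_matches (find_unique_matches possible_matches)

-- ===== LEMMAS AND PROOFS =====

-- common specification: first pair per bd_pk, in first-seen order
def pvSpec (seen : List Int) : List (Int × Int) → List (Int × Int)
  | [] => []
  | p :: t => if p.2 ∈ seen then pvSpec seen t else (p.1, p.2) :: pvSpec (seen ++ [p.2]) t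

lemma emit_acc (l : List (Int × List Int)) (acc : List (Int × Int)) :
    l.foldl pvEmitStep acc = acc ++ l.foldl pvEmitStep [] := by
  induction l generalizing acc with
  | nil => simp
  | cons x t ih =>
    simp only [List.foldl_cons]
    rw [ih, ih (pvEmitStep [] x)]
    unfold pvEmitStep
    split <;> simp

lemma A_inv (pm : List (Int × Int)) (d : PySem.Dict Int (List Int))
    (hnd : d.keys.Nodup) (hvals : ∀ p ∈ d.items, p.2 ≠ []) :
    ((pm.foldl pvGroupStep d).items.foldl pvEmitStep []) =
      d.items.foldl pvEmitStep [] ++ pvSpec d.keys pm := by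
  induction pm generalizing d with
  | nil => simp [pvSpec]
  | cons p t ih =>
    simp only [List.foldl_cons, pvSpec]
    by_cases h : p.2 ∈ d.keys
    · have hc : d.contains p.2 = true := (PySem.Dict.contains_iff_mem_keys d p.2).mpr h
      set d' := pvGroupStep d p with hd'
      have hkeys : d'.keys = d.keys := by
        rw [hd']; unfold pvGroupStep; exact PySem.Dict.keys_insert_of_contains _ _ hc
      have hitems : d'.items = d.items.map
          (fun q => if q.1 == p.2 then (p.2, d.getD p.2 [] ++ [p.1]) else q) := by
        rw [hd']; unfold pvGroupStep; exact PySem.Dict.items_insert_of_contains _ _ hc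
      have hemit : d'.items.foldl pvEmitStep [] = d.items.foldl pvEmitStep [] := by
        rw [hitems, List.foldl_map]
        apply PySem.List.foldl_congr_mem
        intro acc q hq
        by_cases hk : q.1 == p.2
        · have hq2 : q.2 = d.getD p.2 [] := by
            have hkk : q.1 = p.2 := by simpa using hk
            exact (PySem.Dict.getD_of_mem_items d (hkk ▸ (by exact hq)) hnd []).symm
          have hne : q.2 ≠ [] := hvals q hq
          have hkk : q.1 = p.2 := by simpa using hk
          obtain ⟨l0, ls, hl⟩ := List.exists_cons_of_ne_nil hne
          simp [pvEmitStep, ← hq2, hl, hkk]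
        · simp [hk]
      have hvals' : ∀ q ∈ d'.items, q.2 ≠ [] := by
        intro q hq
        rw [hitems] at hq
        obtain ⟨r, hr, hrq⟩ := List.mem_map.mp hq
        by_cases hk : r.1 == p.2 <;> simp [hk] at hrq
        · subst hrq; simp
        · rw [← hrq]; exact hvals r hr
      rw [ih d' (hkeys ▸ hnd) hvals', hemit, hkeys, if_pos h]
    · have hc : d.contains p.2 = false := by
        by_contra hcc
        exact h ((PySem.Dict.contains_iff_mem_keys d p.2).mp (by simpa using hcc))
      set d' := pvGroupStep d p with hd'
      have hg : d.getD p.2 [] = [] := PySem.Dict.getD_of_not_contains d [] hc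
      have hitems : d'.items = d.items ++ [(p.2, [p.1])] := by
        rw [hd']; unfold pvGroupStep
        rw [PySem.Dict.items_insert_of_not_contains _ _ hc, hg]
        simp
      have hkeys : d'.keys = d.keys ++ [p.2] := by
        rw [hd']; unfold pvGroupStep; exact PySem.Dict.keys_insert_of_not_contains d _ hc
      have hemit : d'.items.foldl pvEmitStep [] = d.items.foldl pvEmitStep [] ++ [(p.1, p.2)] := by
        rw [hitems, List.foldl_append]
        rw [emit_acc]
        simp [pvEmitStep]
      have hvals' : ∀ q ∈ d'.items, q.2 ≠ [] := by
        intro q hq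
        rw [hitems] at hq
        rcases List.mem_append.mp hq with hq | hq
        · exact hvals q hq
        · simp at hq; subst hq; simp
      have hnd' : d'.keys.Nodup := by
        rw [hkeys]
        simpa using List.Nodup.append hnd (List.nodup_singleton _) (by simpa using h)
      rw [ih d' hnd' hvals', hemit, hkeys, if_neg h]
      simp

lemma B_inv (pm : List (Int × Int)) (seen : PySem.Set Int) (out : List (Int × Int)) :
    (pm.foldl pvSeenStep (seen, out)).2 = out ++ pvSpec seen pm := by
  induction pm generalizing seen out with
  | nil => simp [pvSpec]
  | cons p t ih =>
    simp only [List.foldl_cons, pvSeenStep, pvSpec]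
    by_cases h : p.2 ∈ seen
    · simp [PySem.Set.contains, h, ih]
    · simp [PySem.Set.contains, h, PySem.Set.add, ih]

-- ===== VERDICT (by name: the statement is the Claim_ definition above) =====
theorem find_unique_matches_spec : Claim_equal_find_unique_matches := by
  intro pm _
  unfold Spec_find_unique_matches find_unique_matches find_unique_matches_alt
  rw [B_inv, A_inv pm PySem.Dict.empty (by simp [PySem.Dict.empty])
        (by simp [PySem.Dict.empty])]
  simp [PySem.Dict.empty, PySem.Dict.keys, PySem.Set.empty]
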